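-- pv_equiv track=rewrite | github.com/unknownblueguy6/cnobi | cnobi/manifest.py | _split_on_unescaped_spaces
-- ===== SOURCE A (Python) =====
-- def _split_on_unescaped_spaces(s):
--     """Split string on spaces that aren't preceded by $."""
--     parts = []
--     current = []
--     i = 0
--     while i < len(s):
--         if s[i] == '$' and i + 1 < len(s) and s[i + 1] == ' ':
--             current.append(' ')
--             i += 2
--         elif s[i].isspace():
--             if current:
--                 parts.append(''.join(current))
--                 current = []
--             i += 1
--         else:
--             current.append(s[i])
--             i += 1
--     if current:
--         parts.append(''.join(current))
--     return parts
-- ===== SOURCE B (Python) =====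
-- def _split_on_unescaped_spaces(s):
--     """Split string on spaces that aren't preceded by $.
--
--     Two-phase: first cut s into raw tokens -- maximal runs of
--     (escaped space "$ " | non-whitespace char), like
--     re.findall(r'(?:\$ |\S)+', s) -- then unescape each raw token
--     with str.replace."""
--
--     def munch(i):
--         # end of the longest run of (?:\$ |\S) starting at i
--         j = i
--         while j < len(s):
--             if s[j] == '$' and j + 1 < len(s) and s[j + 1] == ' ':
--                 j += 2
--             elif not s[j].isspace():
--                 j += 1
--             else:
--                 break
--         return j
--
--     tokens = []
--     i = 0
--     while i < len(s):
--         if s[i].isspace():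
--             i += 1
--         else:
--             j = munch(i)
--             tokens.append(s[i:j])
--             i = j
--     return [t.replace('$ ', ' ') for t in tokens]
-- ===== Notes on version B (the rewrite author's own statement) =====
-- stated objective: alternative
-- what changed: A builds each unescaped word character by character in a single accumulating pass, while B first cuts the string into raw token slices (maximal runs of an escaped space or a non-space character, regex-findall style) and then unescapes each raw token in a separate replace step.
import Mathlib
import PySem

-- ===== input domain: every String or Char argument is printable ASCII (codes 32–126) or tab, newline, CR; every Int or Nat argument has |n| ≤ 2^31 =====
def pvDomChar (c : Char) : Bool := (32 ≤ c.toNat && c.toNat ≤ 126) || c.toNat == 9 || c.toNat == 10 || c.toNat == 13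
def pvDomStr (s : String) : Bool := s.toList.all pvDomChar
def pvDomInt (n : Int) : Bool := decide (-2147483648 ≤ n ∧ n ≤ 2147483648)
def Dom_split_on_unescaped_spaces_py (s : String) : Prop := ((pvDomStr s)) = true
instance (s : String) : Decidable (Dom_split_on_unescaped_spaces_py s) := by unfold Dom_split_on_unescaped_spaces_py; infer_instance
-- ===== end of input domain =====

-- B re-implements the split in two phases (tokenize into raw slices, then unescape each
-- token with str.replace) instead of A's single character-accumulating pass; objective:
-- alternative decomposition, same cost, no speed claim.

-- ===== PORT A =====
-- A's while loop over index i with state (parts, current), one branch per line of the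
-- Python if/elif/else chain; "s[i] == '$' and i+1 < len(s) and s[i+1] == ' '" is
-- "c = '$' ∧ rest.head? = some ' '", ''.join(current) is String.ofList.
def aLoop : List Char → List String → List Char → List String
  | [], parts, current => if current = [] then parts else parts ++ [String.ofList current]
  | c :: rest, parts, current =>
      if c = '$' ∧ rest.head? = some ' ' then
        aLoop rest.tail parts (current ++ [' '])
      else if PySem.Chars.isspace c then
        if current = [] then aLoop rest parts []
        else aLoop rest (parts ++ [String.ofList current]) []
      else aLoop rest parts (current ++ [c])
  termination_by l _ _ => l.length
  decreasing_by all_goals (simp [List.length_tail]; try omega)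

def split_on_unescaped_spaces_py (s : String) : List String := aLoop s.toList [] []

-- ===== PORT B =====
-- Source B's munch(i) returns the index j past the longest run of (escaped space "$ " |
-- non-space) starting at i, and the raw token is the slice s[i:j]; ported structurally
-- as a function returning (that token, the remaining suffix) — the same cut of s.
def bMunch : List Char → List Char × List Char
  | [] => ([], [])
  | c :: rest =>
      if c = '$' ∧ rest.head? = some ' ' then
        let p := bMunch rest.tail
        ('$' :: ' ' :: p.1, p.2)
      else if ¬ PySem.Chars.isspace c then
        let p := bMunch rest
        (c :: p.1, p.2)
      else ([], c :: rest)
  termination_by l => l.length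
  decreasing_by all_goals (simp [List.length_tail]; try omega)

-- the two facts bFindall's termination cites: munching conserves total length, and a
-- token starting at a non-space character is nonempty
lemma bMunch_len : ∀ l : List Char, (bMunch l).1.length + (bMunch l).2.length = l.length := by
  intro l
  induction l using bMunch.induct with
  | case1 => simp [bMunch]
  | case2 c rest h ih =>
    obtain ⟨rfl, hh⟩ := h
    cases rest with
    | nil => simp at hh
    | cons d rest' =>
      simp only [List.head?_cons, Option.some.injEq] at hh
      subst hh
      rw [bMunch, if_pos (⟨rfl, rfl⟩ : ('$':Char) = '$' ∧ (' '::rest').head? = some ' ')]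
      simp only [List.tail_cons] at ih
      show ('$' :: ' ' :: (bMunch rest').1).length + (bMunch rest').2.length
            = ('$' :: ' ' :: rest').length
      simp only [List.length_cons]
      omega
  | case3 c rest h hs ih =>
    rw [bMunch, if_neg h, if_pos hs]
    show (c :: (bMunch rest).1).length + (bMunch rest).2.length = (c :: rest).length
    simp only [List.length_cons]
    omega
  | case4 c rest h hs =>
    rw [bMunch, if_neg h, if_neg hs]
    simp

lemma bMunch_fst_ne_nil (c : Char) (rest : List Char) (h : ¬ PySem.Chars.isspace c) :
    (bMunch (c :: rest)).1 ≠ [] := by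
  rw [bMunch]
  split_ifs <;> simp_all

-- Source B's outer while loop: skip a whitespace character, otherwise emit the munched raw
-- token and continue after it.
def bFindall : List Char → List (List Char)
  | [] => []
  | c :: rest =>
      if PySem.Chars.isspace c then bFindall rest
      else (bMunch (c :: rest)).1 :: bFindall (bMunch (c :: rest)).2
  termination_by l => l.length
  decreasing_by
  · simp
  · have h1 := bMunch_len (c :: rest)
    have h2 := bMunch_fst_ne_nil c rest (by simp_all)
    cases hm : (bMunch (c :: rest)).1 with
    | nil => exact absurd hm h2
    | cons x xs => rw [hm] at h1; simp at h1 ⊢; omega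

-- the final comprehension: t.replace('$ ', ' ') is PySem.Chars.replace t "$ " " " (exact)
def split_on_unescaped_spaces_py_alt (s : String) : List String :=
  (bFindall s.toList).map (fun t => String.ofList (PySem.Chars.replace t ['$', ' '] [' ']))

-- ===== PRECONDITION & SPEC =====
def Spec_split_on_unescaped_spaces_py (s : String) (out : List String) : Prop := out = split_on_unescaped_spaces_py_alt s
instance (s : String) (out : List String) : Decidable (Spec_split_on_unescaped_spaces_py s out) := by unfold Spec_split_on_unescaped_spaces_py; infer_instance

-- ===== CLAIM (what is proved, stated in full; the proofs are below) =====
def Claim_equal_split_on_unescaped_spaces_py : Prop := ∀ (s : String), Dom_split_on_unescaped_spaces_py s → Spec_split_on_unescaped_spaces_py s (split_on_unescaped_spaces_py s)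

-- ===== LEMMAS AND PROOFS =====

-- what replace '$ ' → ' ' computes on a token: a left-to-right two-character scan
def unescTok : List Char → List Char
  | [] => []
  | [c] => [c]
  | c :: d :: t => if c = '$' ∧ d = ' ' then ' ' :: unescTok t else c :: unescTok (d :: t)

lemma go_eq (fuel : Nat) : ∀ (l acc : List Char), l.length ≤ fuel →
    PySem.Chars.replace.go ['$', ' '] [' '] fuel l acc = acc.reverse ++ unescTok l := by
  induction fuel with
  | zero =>
    intro l acc h
    have : l = [] := by cases l <;> simp_all
    subst this; simp [PySem.Chars.replace.go, unescTok]
  | succ n ih =>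
    intro l acc h
    match l with
    | [] => simp [PySem.Chars.replace.go, unescTok]
    | [c] =>
      rw [PySem.Chars.replace.go]
      have hp : List.isPrefixOf ['$', ' '] [c] = false := by simp [List.isPrefixOf]
      rw [hp]
      simp only [Bool.false_eq_true, if_false]
      rw [ih [] (c :: acc) (by simp)]
      simp [unescTok]
    | c :: d :: t =>
      rw [PySem.Chars.replace.go]
      by_cases hcd : c = '$' ∧ d = ' '
      · obtain ⟨rfl, rfl⟩ := hcd
        have hp : List.isPrefixOf ['$', ' '] ('$' :: ' ' :: t) = true := by simp [List.isPrefixOf]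
        rw [hp]
        simp only [if_true]
        rw [show ∀ acc : List Char, PySem.Chars.replace.go ['$', ' '] [' '] n (List.drop ['$', ' '].length ('$' :: ' ' :: t)) ([' '].reverse ++ acc) = PySem.Chars.replace.go ['$', ' '] [' '] n t (' ' :: acc) from fun _ => rfl]
        rw [ih t (' ' :: acc) (by simp at h ⊢; omega)]
        simp [unescTok]
      · have hp : List.isPrefixOf ['$', ' '] (c :: d :: t) = false := by
          simp [List.isPrefixOf]; intro h1 h2; exact hcd ⟨h1.symm, h2.symm⟩
        rw [hp]
        simp only [Bool.false_eq_true, if_false]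
        rw [ih (d :: t) (c :: acc) (by simp at h ⊢; omega)]
        rw [unescTok]
        simp [hcd]

lemma replace_eq_unescTok (m : List Char) :
    PySem.Chars.replace m ['$', ' '] [' '] = unescTok m := by
  rw [PySem.Chars.replace]
  simp [go_eq m.length m [] (le_refl _)]

lemma unescTok_cons (c : Char) (t : List Char) (h : ¬ (c = '$' ∧ t.head? = some ' ')) :
    unescTok (c :: t) = c :: unescTok t := by
  cases t with
  | nil => simp [unescTok]
  | cons d t' =>
    rw [unescTok]
    simp only [List.head?_cons] at h
    have : ¬ (c = '$' ∧ d = ' ') := by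
      intro ⟨h1, h2⟩; exact h ⟨h1, by rw [h2]⟩
    simp [this]

lemma bMunch_head : ∀ l : List Char, (bMunch l).1 = [] ∨ (bMunch l).1.head? = l.head? := by
  intro l
  cases l with
  | nil => left; simp [bMunch]
  | cons c rest =>
    rw [bMunch]
    split_ifs with h1 h2
    · right; obtain ⟨rfl, _⟩ := h1; simp
    · left; simp
    · right; simp

-- the token invariant: from any pending unescaped prefix cur, A finishes the current
-- token exactly as "cur followed by the unescaping of B's munched raw token"
lemma aLoop_munch : ∀ (l : List Char) (parts : List String) (cur : List Char),
    (cur ≠ [] ∨ (bMunch l).1 ≠ []) →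
    aLoop l parts cur
      = aLoop (bMunch l).2 (parts ++ [String.ofList (cur ++ unescTok (bMunch l).1)]) [] := by
  intro l
  induction l using bMunch.induct with
  | case1 =>
    intro parts cur hcur
    simp only [bMunch] at hcur ⊢
    have hc : cur ≠ [] := by tauto
    rw [aLoop, aLoop]
    simp [hc, unescTok]
  | case2 c rest h ih =>
    intro parts cur _
    rw [aLoop, if_pos h, bMunch, if_pos h]
    rw [ih parts (cur ++ [' ']) (Or.inl (by simp))]
    show _ = aLoop (bMunch rest.tail).2
      (parts ++ [String.ofList (cur ++ unescTok ('$' :: ' ' :: (bMunch rest.tail).1))]) []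
    have hu : unescTok ('$' :: ' ' :: (bMunch rest.tail).1)
        = ' ' :: unescTok (bMunch rest.tail).1 := by
      rw [unescTok]; simp
    rw [hu]
    simp
  | case3 c rest h hs ih =>
    intro parts cur _
    rw [aLoop, if_neg h, if_neg hs, bMunch, if_neg h, if_pos hs]
    rw [ih parts (cur ++ [c]) (Or.inl (by simp))]
    show _ = aLoop (bMunch rest).2
      (parts ++ [String.ofList (cur ++ unescTok (c :: (bMunch rest).1))]) []
    have hnp : ¬ (c = '$' ∧ ((bMunch rest).1).head? = some ' ') := by
      intro ⟨hc, hhead⟩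
      rcases bMunch_head rest with he | he
      · rw [he] at hhead; simp at hhead
      · rw [he] at hhead
        exact h ⟨hc, hhead⟩
    rw [unescTok_cons c _ hnp]
    simp
  | case4 c rest h hs =>
    intro parts cur hcur
    simp only [not_not] at hs
    rw [bMunch, if_neg h, if_neg (by simp [hs])]
    have hc : cur ≠ [] := by
      rcases hcur with hc | hne
      · exact hc
      · exfalso; apply hne; rw [bMunch, if_neg h, if_neg (by simp [hs])]
    conv_lhs => rw [aLoop, if_neg h, if_pos hs, if_neg hc]
    conv_rhs => rw [aLoop, if_neg h, if_pos hs, if_pos rfl]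
    simp [unescTok]

lemma aLoop_eq_bFindall : ∀ (l : List Char) (parts : List String),
    aLoop l parts []
      = parts ++ (bFindall l).map (fun t => String.ofList (unescTok t)) := by
  intro l
  induction l using bFindall.induct with
  | case1 => intro parts; rw [aLoop, bFindall]; simp
  | case2 c rest hs ih =>
    intro parts
    have hcd : c ≠ '$' := by
      intro hc; rw [hc] at hs; exact absurd hs (by decide)
    have hnp : ¬ (c = '$' ∧ rest.head? = some ' ') := fun ⟨h1, _⟩ => hcd h1
    rw [aLoop, if_neg hnp, if_pos hs, if_pos rfl, bFindall, if_pos hs]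
    exact ih parts
  | case3 c rest hs ih =>
    intro parts
    rw [aLoop_munch (c :: rest) parts []
      (Or.inr (bMunch_fst_ne_nil c rest hs))]
    rw [bFindall, if_neg hs]
    simp only [List.nil_append, List.map_cons]
    rw [ih]
    simp

-- ===== VERDICT (by name: the statement is the Claim_ definition above) =====
theorem split_on_unescaped_spaces_py_spec : Claim_equal_split_on_unescaped_spaces_py := by
  intro s _
  unfold Spec_split_on_unescaped_spaces_py split_on_unescaped_spaces_py split_on_unescaped_spaces_py_alt
  rw [aLoop_eq_bFindall]
  simp [replace_eq_unescTok]
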